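-- pv_equiv track=rewrite | github.com/KASEM007/Python-codeacademy | List_challenges/stressful_subj.py | is_stressful
-- ===== SOURCE A (Python) =====
-- def is_stressful(subj):
--     for word in ("help", "asap", "urgent"):
--         s = "".join(x for x in subj.lower() if x in word + " ")
--         for i in s * len(s):
--             s = s.replace(i + i, i)
--         if s.count(word):
--             return True
--     return subj == subj.upper() or subj.endswith("!!!")
-- ===== SOURCE B (Python) =====
-- def is_stressful(subj):
--     low = subj.lower()
--     for word in ("help", "asap", "urgent"):
--         allowed = set(word + " ")
--         out = []
--         for ch in low:
--             if ch in allowed and (not out or out[-1] != ch):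
--                 out.append(ch)
--         if word in "".join(out):
--             return True
--     return subj == subj.upper() or subj.endswith("!!!")
-- ===== Notes on version B (the rewrite author's own statement) =====
-- stated objective: faster
-- what changed: A filters the subject per keyword and then collapses repeated letters with a quadratic pass of str.replace over s*len(s) (~O(n^3)); B collapses consecutive duplicates in a single forward pass while filtering and then does one substring check per keyword (O(n)).
import Mathlib
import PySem

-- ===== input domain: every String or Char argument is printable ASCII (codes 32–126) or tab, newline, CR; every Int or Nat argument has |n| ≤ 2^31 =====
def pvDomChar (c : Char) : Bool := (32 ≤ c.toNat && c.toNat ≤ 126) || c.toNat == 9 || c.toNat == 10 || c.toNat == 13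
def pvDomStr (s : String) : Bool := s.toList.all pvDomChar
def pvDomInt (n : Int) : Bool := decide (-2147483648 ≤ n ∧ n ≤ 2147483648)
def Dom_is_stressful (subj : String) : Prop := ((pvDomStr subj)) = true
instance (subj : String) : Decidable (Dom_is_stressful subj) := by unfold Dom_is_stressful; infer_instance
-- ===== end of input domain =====

-- B replaces A's repeated str.replace collapsing pass (over s*len(s)) with a single
-- forward filter-and-collapse pass followed by one substring test per keyword: faster (asymptotic).

-- ===== PORT A =====
-- Python A, transliterated; 's * len(s)' has no PySem primitive and is ported by hand as
-- len(s) concatenated copies of s (exact), computed once before the loop as in Python.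
def is_stressful (subj : String) : Bool :=
  if ["help", "asap", "urgent"].any (fun word =>
      -- s = "".join(x for x in subj.lower() if x in word + " ")
      let s : List Char := (PySem.Str.lower subj).toList.filter
        (fun x => PySem.Chars.isIn [x] (word.toList ++ [' ']))
      -- for i in s * len(s): s = s.replace(i + i, i)
      let iter : List Char := (List.replicate s.length s).flatten
      let s : List Char := iter.foldl (fun t i => PySem.Chars.replace t [i, i] [i]) s
      -- if s.count(word): return True
      decide (0 < PySem.Chars.count s word.toList))
  then true
  else (subj == PySem.Str.upper subj) || PySem.Str.endswith subj "!!!"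

-- ===== PORT B =====
-- transliteration of Source B: one forward pass builds the filtered, duplicate-collapsed
-- text (accumulator kept reversed; out[-1] is acc.head?), then one substring check.
def is_stressful_alt (subj : String) : Bool :=
  let low : List Char := (PySem.Str.lower subj).toList
  if ["help", "asap", "urgent"].any (fun word =>
      let allowed : PySem.Set Char := PySem.Set.ofList (word.toList ++ [' '])
      let out : List Char := low.foldl (fun acc ch =>
        if PySem.Set.contains allowed ch && !(acc.head? == some ch) then ch :: acc else acc) []
      PySem.Chars.isIn word.toList out.reverse)
  then true
  else (subj == PySem.Str.upper subj) || PySem.Str.endswith subj "!!!"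

-- ===== PRECONDITION & SPEC =====
def Spec_is_stressful (subj : String) (out : Bool) : Prop := out = is_stressful_alt subj
instance (subj : String) (out : Bool) : Decidable (Spec_is_stressful subj out) := by unfold Spec_is_stressful; infer_instance

-- ===== CLAIM (what is proved, stated in full; the proofs are below) =====
def Claim_equal_is_stressful : Prop := ∀ (subj : String), Dom_is_stressful subj → Spec_is_stressful subj (is_stressful subj)

-- ===== LEMMAS AND PROOFS =====

-- collapse of consecutive duplicates (the common normal form both ports converge to)
def pvCollapse : List Char → List Char
  | [] => []
  | [a] => [a]
  | a :: b :: t => if a = b then pvCollapse (b :: t) else a :: pvCollapse (b :: t)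

-- what one pass of s.replace(i+i, i) computes (proved against PySem.Chars.replace.go below)
def pvRepAux (c : Char) : List Char → List Char
  | a :: b :: t => if a = c ∧ b = c then c :: pvRepAux c t else a :: pvRepAux c (b :: t)
  | l => l

def pvHasPair (c : Char) : List Char → Bool
  | a :: b :: t => (a = c ∧ b = c) || pvHasPair c (b :: t)
  | _ => false

-- number of adjacent equal pairs
def pvNN : List Char → Nat
  | a :: b :: t => (if a = b then 1 else 0) + pvNN (b :: t)
  | _ => 0

-- B-side helper: the collapse produced by the single forward pass
def pvDedupeFrom (last? : Option Char) : List Char → List Char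
  | [] => []
  | y :: t => if last? == some y then pvDedupeFrom last? t else y :: pvDedupeFrom (some y) t

lemma pvRepAux_head (c : Char) (l : List Char) : (pvRepAux c l).head? = l.head? := by
  fun_induction pvRepAux c l with
  | case1 a b t h ih => simp [h.1]
  | case2 a b t h ih => simp
  | case3 l h => rfl

lemma pvCollapse_cons (x : Char) (l : List Char) :
    pvCollapse (x :: l) = if l.head? = some x then pvCollapse l else x :: pvCollapse l := by
  cases l with
  | nil => simp [pvCollapse]
  | cons b t =>
    by_cases h : b = x
    · subst h; simp [pvCollapse]
    · have h' : ¬ x = b := fun e => h e.symm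
      simp [pvCollapse, h, h']

lemma pvNN_cons (x : Char) (l : List Char) :
    pvNN (x :: l) = (if l.head? = some x then 1 else 0) + pvNN l := by
  cases l with
  | nil => simp [pvNN]
  | cons b t =>
    by_cases h : b = x
    · subst h; simp [pvNN]
    · have h' : ¬ x = b := fun e => h e.symm
      simp [pvNN, h, h']

lemma pvCollapse_pvRepAux (c : Char) (l : List Char) :
    pvCollapse (pvRepAux c l) = pvCollapse l := by
  fun_induction pvRepAux c l with
  | case1 a b t h ih =>
    rw [h.1, h.2, pvCollapse_cons, pvRepAux_head, ih]
    have h2 : pvCollapse (c :: c :: t) = pvCollapse (c :: t) := by simp [pvCollapse]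
    rw [h2, pvCollapse_cons]
  | case2 a b t h ih =>
    rw [pvCollapse_cons, pvRepAux_head, ih, pvCollapse_cons (x := a) (l := b :: t)]
  | case3 l h => rfl

lemma pvRepAux_of_not_hasPair (c : Char) (l : List Char) (h : pvHasPair c l = false) :
    pvRepAux c l = l := by
  fun_induction pvRepAux c l with
  | case1 a b t hc ih => simp [pvHasPair, hc.1, hc.2] at h
  | case2 a b t hc ih =>
    simp only [pvHasPair, Bool.or_eq_false_iff] at h
    rw [ih h.2]
  | case3 l hl => rfl

lemma pvNN_pvRepAux (c : Char) (l : List Char) :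
    pvNN (pvRepAux c l) ≤ pvNN l ∧ (pvHasPair c l = true → pvNN (pvRepAux c l) < pvNN l) := by
  fun_induction pvRepAux c l with
  | case1 a b t h ih =>
    rw [h.1, h.2, pvNN_cons, pvRepAux_head]
    have h2 : pvNN (c :: c :: t) = 1 + pvNN (c :: t) := by simp [pvNN]
    rw [h2, pvNN_cons]
    refine ⟨?_, fun _ => ?_⟩ <;> (have := ih.1; split <;> omega)
  | case2 a b t h ih =>
    rw [pvNN_cons, pvRepAux_head, pvNN_cons (x := a) (l := b :: t)]
    refine ⟨by have := ih.1; omega, fun hp => ?_⟩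
    simp only [pvHasPair, Bool.or_eq_true, decide_eq_true_eq] at hp
    rcases hp with hp | hp
    · exact absurd hp h
    · have := ih.2 hp; omega
  | case3 l hl =>
    refine ⟨le_rfl, fun hp => ?_⟩
    exfalso
    match l, hp with
    | a :: b :: t, hp => exact hl a b t rfl
    | [], hp => simp [pvHasPair] at hp
    | [a], hp => simp [pvHasPair] at hp

lemma pvMem_pvRepAux (c x : Char) (l : List Char) (h : x ∈ pvRepAux c l) : x ∈ l := by
  fun_induction pvRepAux c l with
  | case1 a b t hc ih =>
    rcases List.mem_cons.mp h with rfl | h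
    · simp [hc.1]
    · have := ih h; simp_all
  | case2 a b t hc ih =>
    rcases List.mem_cons.mp h with rfl | h
    · simp
    · have := ih h; simp_all
  | case3 l hl => exact h

lemma pvHasPair_false_of_nn_zero (c : Char) (l : List Char) (h : pvNN l = 0) :
    pvHasPair c l = false := by
  fun_induction pvHasPair c l with
  | case1 a b t ih =>
    simp only [pvNN] at h
    by_cases hab : a = b
    · simp [hab] at h
    · simp only [hab, if_false] at h
      simp only [Bool.or_eq_false_iff, decide_eq_false_iff_not]
      refine ⟨fun hc => hab (hc.1.trans hc.2.symm), ih (by omega)⟩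
  | case2 l hl => rfl

lemma pvExists_hasPair_of_nn_pos (l : List Char) (h : 0 < pvNN l) :
    ∃ c ∈ l, pvHasPair c l = true := by
  induction l with
  | nil => simp [pvNN] at h
  | cons a t ih =>
    cases t with
    | nil => simp [pvNN] at h
    | cons b t' =>
      by_cases hab : a = b
      · exact ⟨a, by simp, by simp [pvHasPair, hab.symm]⟩
      · have h' : 0 < pvNN (b :: t') := by
          simp only [pvNN, hab, if_false] at h; omega
        obtain ⟨c, hc, hp⟩ := ih h'
        exact ⟨c, by simp [hc], by simp [pvHasPair, hp]⟩

lemma pvCollapse_of_nn_zero (l : List Char) (h : pvNN l = 0) : pvCollapse l = l := by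
  fun_induction pvCollapse l with
  | case3 a t ih => simp [pvNN] at h
  | case4 a b t hab ih =>
    simp only [pvNN, hab, if_false] at h
    rw [ih (by omega)]
  | _ => rfl

lemma pvNN_lt_length (l : List Char) (h : l ≠ []) : pvNN l < l.length := by
  induction l with
  | nil => simp at h
  | cons a t ih =>
    cases t with
    | nil => simp [pvNN]
    | cons b t' =>
      have := ih (by simp)
      simp only [pvNN, List.length_cons] at *
      split <;> omega

lemma pvDedupeFrom_some (a : Char) (m : List Char) :
    a :: pvDedupeFrom (some a) m = pvCollapse (a :: m) := by
  induction m generalizing a with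
  | nil => rfl
  | cons y t ih =>
    by_cases h : a = y
    · subst h
      simp only [pvDedupeFrom, beq_self_eq_true, if_true]
      rw [ih, pvCollapse_cons (x := a) (l := a :: t)]
      simp [pvCollapse_cons]
    · have hb : ((some a : Option Char) == some y) = false := by simp [h]
      simp only [pvDedupeFrom, hb, Bool.false_eq_true, if_false]
      rw [ih y]
      simp [pvCollapse, h]

lemma pvDedupeFrom_none (m : List Char) : pvDedupeFrom none m = pvCollapse m := by
  cases m with
  | nil => rfl
  | cons a t =>
    have hb : ((none : Option Char) == some a) = false := rfl
    simp only [pvDedupeFrom, hb, Bool.false_eq_true, if_false]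
    exact pvDedupeFrom_some a t

-- ---- bridge: PySem.Chars.replace _ [c,c] [c] is pvRepAux ----

lemma pvGo_rep (c : Char) : ∀ (fuel : Nat) (l acc : List Char), l.length ≤ fuel →
    PySem.Chars.replace.go [c, c] [c] fuel l acc = acc.reverse ++ pvRepAux c l := by
  intro fuel
  induction fuel with
  | zero =>
    intro l acc h
    have hl : l = [] := List.eq_nil_of_length_eq_zero (Nat.le_zero.mp h)
    subst hl
    rw [PySem.Chars.replace.go.eq_def]
    simp [pvRepAux]
  | succ n ih =>
    intro l acc h
    match l with
    | [] => rw [PySem.Chars.replace.go.eq_def]; simp [pvRepAux]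
    | [a] =>
      rw [PySem.Chars.replace.go.eq_def]
      have hpre : ([c, c] : List Char).isPrefixOf [a] = false := by
        simp [List.isPrefixOf]
      simp only [hpre, Bool.false_eq_true, if_false]
      rw [ih [] (a :: acc) (by simp)]
      simp [pvRepAux]
    | a :: b :: t =>
      simp only [List.length_cons] at h
      by_cases hc : a = c ∧ b = c
      · rw [hc.1, hc.2]
        rw [PySem.Chars.replace.go.eq_def]
        have hpre : ([c, c] : List Char).isPrefixOf (c :: c :: t) = true := by
          simp [List.isPrefixOf]
        simp only [hpre, if_true]
        rw [show List.drop ([c, c] : List Char).length (c :: c :: t) = t from rfl]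
        rw [ih t (([c] : List Char).reverse ++ acc) (by omega)]
        have hr : pvRepAux c (c :: c :: t) = c :: pvRepAux c t := by simp [pvRepAux]
        rw [hr]
        simp
      · rw [PySem.Chars.replace.go.eq_def]
        have hpre : ([c, c] : List Char).isPrefixOf (a :: b :: t) = false := by
          simp only [List.isPrefixOf, Bool.and_true]
          simp only [Bool.and_eq_false_iff, beq_eq_false_iff_ne, ne_eq]
          by_cases h1 : c = a
          · right; intro h2; exact hc ⟨h1.symm, h2.symm⟩
          · left; exact h1
        simp only [hpre, Bool.false_eq_true, if_false]
        rw [ih (b :: t) (a :: acc) (by simp; omega)]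
        have hr : pvRepAux c (a :: b :: t) = a :: pvRepAux c (b :: t) := by
          simp [pvRepAux, hc]
        rw [hr]
        simp

lemma pvRep_eq (c : Char) (l : List Char) :
    PySem.Chars.replace l [c, c] [c] = pvRepAux c l := by
  rw [PySem.Chars.replace]
  simp only [List.isEmpty_cons, Bool.false_eq_true, if_false]
  rw [pvGo_rep c l.length l [] le_rfl]
  simp

-- ---- the collapse loop over s * len(s) fully collapses ----

lemma pvNN_foldl_le (r l : List Char) :
    pvNN (r.foldl (fun t i => pvRepAux i t) l) ≤ pvNN l := by
  induction r generalizing l with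
  | nil => simp
  | cons c r' ih =>
    simp only [List.foldl_cons]
    exact le_trans (ih (pvRepAux c l)) (pvNN_pvRepAux c l).1

lemma pvMem_foldl (r l : List Char) (x : Char) (h : x ∈ r.foldl (fun t i => pvRepAux i t) l) :
    x ∈ l := by
  induction r generalizing l with
  | nil => simpa using h
  | cons c r' ih => exact pvMem_pvRepAux c x l (ih (pvRepAux c l) h)

lemma pvCollapse_foldl (r l : List Char) :
    pvCollapse (r.foldl (fun t i => pvRepAux i t) l) = pvCollapse l := by
  induction r generalizing l with
  | nil => rfl
  | cons c r' ih =>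
    simp only [List.foldl_cons]
    rw [ih (pvRepAux c l), pvCollapse_pvRepAux]

lemma pvFoldl_id_of_nn_zero (r l : List Char) (h : pvNN l = 0) :
    r.foldl (fun t i => pvRepAux i t) l = l := by
  induction r with
  | nil => rfl
  | cons c r' ih =>
    simp only [List.foldl_cons]
    rw [pvRepAux_of_not_hasPair c l (pvHasPair_false_of_nn_zero c l h), ih]

lemma pvRound (r l : List Char) :
    (r.foldl (fun t i => pvRepAux i t) l = l ∧ ∀ c ∈ r, pvHasPair c l = false) ∨
      pvNN (r.foldl (fun t i => pvRepAux i t) l) < pvNN l := by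
  induction r generalizing l with
  | nil => exact Or.inl ⟨rfl, by simp⟩
  | cons c r' ih =>
    by_cases h : pvHasPair c l = true
    · right
      simp only [List.foldl_cons]
      exact lt_of_le_of_lt (pvNN_foldl_le r' (pvRepAux c l)) ((pvNN_pvRepAux c l).2 h)
    · have h' : pvHasPair c l = false := by simpa using h
      have hrep : pvRepAux c l = l := pvRepAux_of_not_hasPair c l h'
      simp only [List.foldl_cons, hrep]
      rcases ih l with ⟨heq, hall⟩ | hlt
      · refine Or.inl ⟨heq, ?_⟩
        intro d hd
        rcases List.mem_cons.mp hd with rfl | hd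
        · exact h'
        · exact hall _ hd
      · exact Or.inr hlt

lemma pvM (k : Nat) (s : List Char) : ∀ (l : List Char), (∀ x ∈ l, x ∈ s) → pvNN l < k →
    pvNN (((List.replicate k s).flatten).foldl (fun t i => pvRepAux i t) l) = 0 := by
  induction k with
  | zero => intro l _ h; omega
  | succ n ih =>
    intro l hmem h
    rw [List.replicate_succ, List.flatten_cons, List.foldl_append]
    rcases pvRound s l with ⟨heq, hall⟩ | hlt
    · rw [heq]
      have hz : pvNN l = 0 := by
        by_contra hz
        obtain ⟨c, hc, hp⟩ := pvExists_hasPair_of_nn_pos l (Nat.pos_of_ne_zero hz)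
        rw [hall c (hmem c hc)] at hp
        exact Bool.false_ne_true hp
      rw [pvFoldl_id_of_nn_zero _ l hz]
      exact hz
    · refine ih _ (fun x hx => hmem x (pvMem_foldl s l x hx)) (by omega)

lemma pvLoopA (s : List Char) :
    ((List.replicate s.length s).flatten).foldl (fun t i => PySem.Chars.replace t [i, i] [i]) s
      = pvCollapse s := by
  have hfun : (fun (t : List Char) (i : Char) => PySem.Chars.replace t [i, i] [i])
      = fun t i => pvRepAux i t := by
    funext t i; exact pvRep_eq i t
  rw [hfun]
  rcases eq_or_ne s [] with rfl | hs
  · rfl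
  · have h0 : pvNN (((List.replicate s.length s).flatten).foldl (fun t i => pvRepAux i t) s) = 0 :=
      pvM s.length s s (fun x hx => hx) (pvNN_lt_length s hs)
    have h1 := pvCollapse_foldl ((List.replicate s.length s).flatten) s
    rw [← h1, pvCollapse_of_nn_zero _ h0]

-- ---- count positivity is substring membership ----

lemma pvGo_count (sub : List Char) (hs : sub ≠ []) : ∀ (fuel : Nat) (l : List Char) (acc : Nat),
    l.length ≤ fuel → (0 < PySem.Chars.count.go sub fuel l acc ↔ 0 < acc ∨ sub <:+: l) := by
  intro fuel
  induction fuel with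
  | zero =>
    intro l acc h
    have hl : l = [] := List.eq_nil_of_length_eq_zero (Nat.le_zero.mp h)
    subst hl
    rw [PySem.Chars.count.go.eq_def]
    simp only [iff_self_or]
    intro h'
    exact absurd (List.infix_nil.mp h') hs
  | succ n ih =>
    intro l acc h
    match l with
    | [] =>
      rw [PySem.Chars.count.go.eq_def]
      simp only [iff_self_or]
      intro h'
      exact absurd (List.infix_nil.mp h') hs
    | a :: t =>
      rw [PySem.Chars.count.go.eq_def]
      simp only [List.length_cons] at h
      by_cases hpre : sub.isPrefixOf (a :: t) = true
      · simp only [hpre, if_true]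
        have h1 : 1 ≤ sub.length := by
          cases sub with
          | nil => exact absurd rfl hs
          | cons x xs => simp
        have hlen : (List.drop sub.length (a :: t)).length ≤ n := by
          simp only [List.length_drop, List.length_cons]
          omega
        rw [ih _ _ hlen]
        have hinf : sub <:+: a :: t := (List.isPrefixOf_iff_prefix.mp hpre).isInfix
        simp [hinf]
      · have hpre' : sub.isPrefixOf (a :: t) = false := Bool.eq_false_iff.mpr hpre
        simp only [hpre', Bool.false_eq_true, if_false]
        rw [ih t acc (by omega), List.infix_cons_iff]
        have hnp : ¬ sub <+: a :: t := fun hp => hpre (List.isPrefixOf_iff_prefix.mpr hp)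
        tauto

lemma pvCount_pos_iff (s sub : List Char) (hs : sub ≠ []) :
    0 < PySem.Chars.count s sub ↔ PySem.Chars.isIn sub s = true := by
  rw [PySem.Chars.isIn_iff_infix, PySem.Chars.count]
  have he : sub.isEmpty = false := by simpa [List.isEmpty_iff] using hs
  simp only [he, Bool.false_eq_true, if_false]
  rw [pvGo_count sub hs s.length s 0 le_rfl]
  simp

-- ---- the single B pass computes pvCollapse of the filtered text ----

lemma pvFold_squeeze (p : Char → Bool) (l : List Char) : ∀ (acc : List Char),
    (l.foldl (fun acc ch => if p ch && !(acc.head? == some ch) then ch :: acc else acc) acc).reverse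
      = acc.reverse ++ pvDedupeFrom acc.head? (l.filter p) := by
  induction l with
  | nil => intro acc; simp [pvDedupeFrom]
  | cons ch l' ih =>
    intro acc
    simp only [List.foldl_cons, List.filter_cons]
    by_cases hp : p ch
    · by_cases hh : (acc.head? == some ch) = true
      · rw [if_neg (by simp [hh]), if_pos (by simp [hp]), ih acc]
        simp [pvDedupeFrom, hh]
      · have hh' : (acc.head? == some ch) = false := Bool.eq_false_iff.mpr hh
        rw [if_pos (by simp [hp, hh']), if_pos (by simp [hp]), ih (ch :: acc)]
        simp [pvDedupeFrom, hh']
    · have hp' : p ch = false := Bool.eq_false_iff.mpr hp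
      rw [if_neg (by simp [hp']), if_neg (by simp [hp'])]
      exact ih acc

-- ---- the per-word checks agree ----

lemma pvPred_eq (ws : List Char) (x : Char) :
    PySem.Set.contains (PySem.Set.ofList ws) x = PySem.Chars.isIn [x] ws := by
  have h1 : PySem.Set.contains (PySem.Set.ofList ws) x = true ↔ x ∈ ws := by
    rw [PySem.Set.contains_iff, PySem.Set.mem_ofList]
  have h2 : PySem.Chars.isIn [x] ws = true ↔ x ∈ ws := by
    rw [PySem.Chars.isIn_iff_infix]
    constructor
    · intro h; exact List.singleton_sublist.mp h.sublist
    · intro h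
      obtain ⟨s, t, rfl⟩ := List.append_of_mem h
      exact ⟨s, t, by simp⟩
  rw [Bool.eq_iff_iff, h1, h2]

lemma pvCheck_eq (word low : List Char) (hw : word ≠ []) :
    (decide (0 < PySem.Chars.count
        (((List.replicate (low.filter (fun x => PySem.Chars.isIn [x] (word ++ [' ']))).length
            (low.filter (fun x => PySem.Chars.isIn [x] (word ++ [' '])))).flatten).foldl
          (fun t i => PySem.Chars.replace t [i, i] [i])
          (low.filter (fun x => PySem.Chars.isIn [x] (word ++ [' '])))) word))
      = PySem.Chars.isIn word
          ((low.foldl (fun acc ch =>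
            if PySem.Set.contains (PySem.Set.ofList (word ++ [' '])) ch && !(acc.head? == some ch)
            then ch :: acc else acc) []).reverse) := by
  rw [pvLoopA]
  rw [pvFold_squeeze (fun ch => PySem.Set.contains (PySem.Set.ofList (word ++ [' '])) ch) low []]
  have hfil : low.filter (fun ch => PySem.Set.contains (PySem.Set.ofList (word ++ [' '])) ch)
      = low.filter (fun x => PySem.Chars.isIn [x] (word ++ [' '])) := by
    exact List.filter_congr (fun x _ => pvPred_eq (word ++ [' ']) x)
  simp only [List.reverse_nil, List.nil_append, List.head?_nil]
  rw [pvDedupeFrom_none, hfil]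
  rw [Bool.eq_iff_iff, decide_eq_true_iff]
  exact pvCount_pos_iff _ word hw

-- ===== VERDICT (by name: the statement is the Claim_ definition above) =====
theorem is_stressful_spec : Claim_equal_is_stressful := by
  intro subj _
  show is_stressful subj = is_stressful_alt subj
  unfold is_stressful is_stressful_alt
  simp only [List.any_cons, List.any_nil, Bool.or_false]
  rw [pvCheck_eq "help".toList _ (by decide), pvCheck_eq "asap".toList _ (by decide),
    pvCheck_eq "urgent".toList _ (by decide)]
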